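-- pv_equiv track=rewrite | github.com/chinesezyc/leetcode | 贪心/简单/LCS 02. 完成一半题目.py | halfQuestions
-- ===== SOURCE A (Python) =====
-- from typing import List
-- import collections
--
-- def halfQuestions(questions: List[int]) -> int:
--     n = len(questions) // 2
--     num_freq = collections.Counter(questions)
--     xf = sorted(num_freq.items(), key=lambda x: -x[1])
--
--     kind = 0
--     cnt = 0
--     for x, f in xf:
--         if cnt >= n:
--             return kind
--         else:
--             cnt += f
--             kind += 1
--     return kind
-- ===== SOURCE B (Python) =====
-- import collections
--
-- def halfQuestions(questions):
--     n = len(questions) // 2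
--     freq = collections.Counter(questions)
--     if not freq:
--         return 0
--     maxf = max(freq.values())
--     buckets = [0] * (maxf + 1)   # buckets[f] = number of kinds occurring exactly f times
--     for f in freq.values():
--         buckets[f] += 1
--     kind = 0
--     cnt = 0
--     for f in range(maxf, 0, -1):
--         for _ in range(buckets[f]):
--             if cnt >= n:
--                 return kind
--             cnt += f
--             kind += 1
--     return kind
-- ===== Notes on version B (the rewrite author's own statement) =====
-- stated objective: alternative
-- what changed: Replaces sorting the Counter items by descending frequency with a counting-sort bucket table (buckets[f] = number of kinds occurring f times) traversed from the maximum frequency down, running the same greedy accumulation over it.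
import Mathlib
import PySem

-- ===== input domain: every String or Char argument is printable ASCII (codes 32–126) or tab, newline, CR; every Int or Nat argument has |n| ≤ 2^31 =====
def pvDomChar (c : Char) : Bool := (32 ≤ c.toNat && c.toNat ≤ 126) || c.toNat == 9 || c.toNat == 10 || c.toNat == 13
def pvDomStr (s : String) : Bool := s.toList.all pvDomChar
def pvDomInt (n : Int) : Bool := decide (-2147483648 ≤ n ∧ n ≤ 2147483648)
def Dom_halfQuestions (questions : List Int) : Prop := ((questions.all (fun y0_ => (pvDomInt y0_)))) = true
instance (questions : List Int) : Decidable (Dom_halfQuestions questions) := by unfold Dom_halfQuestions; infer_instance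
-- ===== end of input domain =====

-- B replaces A's comparison sort of the Counter items by a counting-sort bucket table
-- traversed from the highest frequency down (objective: alternative algorithm, same result).

-- ===== PORT A =====
-- the 'for x, f in xf' loop with its early return
def pvGoA (n : Int) : List (Int × Int) → Int → Int → Int
  | [], _, kind => kind
  | xf :: rest, cnt, kind =>
      if cnt ≥ n then kind else pvGoA n rest (cnt + xf.2) (kind + 1)

def halfQuestions (questions : List Int) : Int :=
  let n := PySem.Int.floordiv (questions.length : Int) 2
  let numFreq := PySem.Dict.counter questions
  let xf := PySem.List.sorted numFreq.items (fun x => -x.2) false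
  pvGoA n xf 0 0

-- ===== PORT B =====
-- buckets[f] += 1 ; the index f is always in range on reachable inputs (1 ≤ f ≤ maxf)
def pvBump (buckets : List Int) (f : Int) : List Int :=
  buckets.set f.toNat (PySem.List.pyGetD buckets f 0 + 1)

-- the inner 'for _ in range(buckets[f])' loop; .inl = the early 'return kind'
def pvInnerB (n f : Int) : Nat → Int × Int → Sum Int (Int × Int)
  | 0, st => .inr st
  | k+1, (cnt, kind) => if cnt ≥ n then .inl kind else pvInnerB n f k (cnt + f, kind + 1)

-- the outer 'for f in range(maxf, 0, -1)' loop
def pvOuterB (n : Int) (buckets : List Int) : List Int → Int × Int → Int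
  | [], st => st.2
  | f :: rest, st =>
      match pvInnerB n f (PySem.List.pyGetD buckets f 0).toNat st with
      | .inl r => r
      | .inr st' => pvOuterB n buckets rest st'

def halfQuestions_alt (questions : List Int) : Int :=
  let n := PySem.Int.floordiv (questions.length : Int) 2
  let freq := PySem.Dict.counter questions
  if freq.size = 0 then 0
  else
    match PySem.List.max? freq.values (fun y => y) with
    | none => 0  -- unreachable: freq is nonempty here
    | some maxf =>
        let buckets := freq.values.foldl pvBump (PySem.List.pyRepeat [0] (maxf + 1))
        pvOuterB n buckets (PySem.List.pyRange maxf 0 (-1)) (0, 0)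

-- ===== PRECONDITION & SPEC =====
def Spec_halfQuestions (questions : List Int) (out : Int) : Prop := out = halfQuestions_alt questions
instance (questions : List Int) (out : Int) : Decidable (Spec_halfQuestions questions out) := by unfold Spec_halfQuestions; infer_instance

-- ===== CLAIM (what is proved, stated in full; the proofs are below) =====
def Claim_equal_halfQuestions : Prop := ∀ (questions : List Int), Dom_halfQuestions questions → Spec_halfQuestions questions (halfQuestions questions)

-- ===== LEMMAS AND PROOFS =====

-- the common greedy loop over a plain list of frequencies
def pvGo (n : Int) : List Int → Int → Int → Int
  | [], _, kind => kind
  | f :: rest, cnt, kind => if cnt ≥ n then kind else pvGo n rest (cnt + f) (kind + 1)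

lemma pvGoA_eq (n : Int) (xf : List (Int × Int)) : ∀ cnt kind,
    pvGoA n xf cnt kind = pvGo n (xf.map Prod.snd) cnt kind := by
  induction xf with
  | nil => intro cnt kind; rfl
  | cons p rest ih =>
      intro cnt kind
      simp only [pvGoA, pvGo, List.map_cons]
      split_ifs with h
      · rfl
      · exact ih _ _

lemma pvInnerB_eq (n f : Int) (k : Nat) : ∀ rest cnt kind,
    (match pvInnerB n f k (cnt, kind) with
     | .inl r => r
     | .inr st => pvGo n rest st.1 st.2)
      = pvGo n (List.replicate k f ++ rest) cnt kind := by
  induction k with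
  | zero => intro rest cnt kind; rfl
  | succ k ih =>
      intro rest cnt kind
      simp only [pvInnerB, List.replicate_succ, List.cons_append, pvGo]
      split_ifs with h
      · rfl
      · exact ih rest _ _

lemma pvOuterB_eq (n : Int) (buckets : List Int) (fs : List Int) : ∀ cnt kind,
    pvOuterB n buckets fs (cnt, kind)
      = pvGo n (fs.flatMap (fun f => List.replicate (PySem.List.pyGetD buckets f 0).toNat f)) cnt kind := by
  induction fs with
  | nil => intro cnt kind; rfl
  | cons f rest ih =>
      intro cnt kind
      simp only [pvOuterB, List.flatMap_cons]
      rw [← pvInnerB_eq n f _ _ cnt kind]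
      cases h : pvInnerB n f (PySem.List.pyGetD buckets f 0).toNat (cnt, kind) with
      | inl r => rfl
      | inr st => exact ih st.1 st.2

lemma pv_count_flatMap_replicate (c : Int → Nat) (fs : List Int) (hnd : fs.Nodup) (v : Int) :
    (fs.flatMap (fun f => List.replicate (c f) f)).count v = if v ∈ fs then c v else 0 := by
  induction fs with
  | nil => simp
  | cons f rest ih =>
      rcases List.nodup_cons.mp hnd with ⟨hfmem, hrest⟩
      simp only [List.flatMap_cons, List.count_append, ih hrest, List.count_replicate,
        List.mem_cons]
      by_cases h : v = f
      · subst h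
        simp [hfmem]
      · simp [h, Ne.symm h]

lemma pv_pairwise_flatMap_replicate (c : Int → Nat) (fs : List Int) (h : fs.Pairwise (· > ·)) :
    (fs.flatMap (fun f => List.replicate (c f) f)).Pairwise (fun a b => b ≤ a) := by
  induction fs with
  | nil => simp
  | cons f rest ih =>
      rcases List.pairwise_cons.mp h with ⟨hf, hrest⟩
      simp only [List.flatMap_cons]
      rw [List.pairwise_append]
      refine ⟨?_, ih hrest, ?_⟩
      · exact List.pairwise_replicate.mpr (Or.inr le_rfl)
      · intro a ha b hb
        obtain ⟨g, hg, hbg⟩ := List.mem_flatMap.mp hb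
        rw [List.eq_of_mem_replicate ha, List.eq_of_mem_replicate hbg]
        exact le_of_lt (hf g hg)

lemma pvBump_getD (vs : List Int) : ∀ init : List Int,
    (∀ f ∈ vs, 0 ≤ f ∧ f.toNat < init.length) → ∀ v : Int, 0 ≤ v → v.toNat < init.length →
    PySem.List.pyGetD (vs.foldl pvBump init) v 0
      = PySem.List.pyGetD init v 0 + vs.count v := by
  induction vs with
  | nil => intro init _ v _ _; simp
  | cons f rest ih =>
      intro init hbound v hv hvlen
      have hf := hbound f (List.mem_cons_self)
      have hlen : (pvBump init f).length = init.length := by simp [pvBump]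
      rw [List.foldl_cons,
        ih (pvBump init f)
          (by rw [hlen]; intro g hg; exact hbound g (List.mem_cons_of_mem _ hg))
          v hv (by omega),
        List.count_cons]
      have hstep : PySem.List.pyGetD (pvBump init f) v 0
          = PySem.List.pyGetD init v 0 + (if (f == v) = true then 1 else 0) := by
        rw [PySem.List.pyGetD_eq_getElem _ _ hv (by omega),
          PySem.List.pyGetD_eq_getElem init _ hv (by omega)]
        simp only [pvBump]
        rw [List.getElem_set]
        by_cases hvf : f = v
        · subst hvf
          rw [if_pos rfl, PySem.List.pyGetD_eq_getElem _ _ hf.1 (by omega)]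
          simp
        · rw [if_neg (by omega), if_neg (by simp [hvf])]
          simp
      rw [hstep]
      push_cast
      omega

lemma pv_main (qs : List Int) (hne : qs ≠ []) :
    halfQuestions qs = halfQuestions_alt qs := by
  have hvals_def : (PySem.Dict.counter qs).values
      = (PySem.Set.ofList qs).map (fun k => ((qs.count k : Int))) := by
    show (PySem.Dict.counter qs).items.map Prod.snd = _
    rw [PySem.Dict.items_counter, List.map_map]
    rfl
  have hvals_pos : ∀ v ∈ (PySem.Dict.counter qs).values, 1 ≤ v := by
    intro v hv
    rw [hvals_def] at hv
    obtain ⟨k, hk, rfl⟩ := List.mem_map.mp hv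
    have hkq : k ∈ qs := (PySem.Set.mem_ofList qs k).mp hk
    have := List.count_pos_iff.mpr hkq
    omega
  have hvne : (PySem.Dict.counter qs).values ≠ [] := by
    obtain ⟨q, qs', rfl⟩ := List.exists_cons_of_ne_nil hne
    intro h
    have hq : q ∈ PySem.Set.ofList (q :: qs') :=
      (PySem.Set.mem_ofList _ _).mpr (by simp)
    have hmem := List.mem_map_of_mem (f := fun k => (((q :: qs').count k : Int))) hq
    rw [← hvals_def, h] at hmem
    exact absurd hmem (List.not_mem_nil)
  have hsize : ¬ (PySem.Dict.counter qs).size = 0 := by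
    show ¬ (PySem.Dict.counter qs).items.length = 0
    intro h
    apply hvne
    show (PySem.Dict.counter qs).items.map Prod.snd = []
    rw [List.length_eq_zero_iff.mp h]
    rfl
  obtain ⟨maxf, hmaxf⟩ : ∃ m,
      PySem.List.max? (PySem.Dict.counter qs).values (fun y => y) = some m := by
    cases h : PySem.List.max? (PySem.Dict.counter qs).values (fun y => y) with
    | none => exact absurd ((PySem.List.max?_eq_none_iff _ _).mp h) hvne
    | some m => exact ⟨m, rfl⟩
  have hle : ∀ y ∈ (PySem.Dict.counter qs).values, y ≤ maxf :=
    PySem.List.max?_isMax hmaxf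
  have hmax1 : (1 : Int) ≤ maxf := hvals_pos _ (PySem.List.max?_mem hmaxf)
  -- the bucket table holds exactly the frequency multiplicities
  have hbuck : ∀ v : Int, 0 < v → v ≤ maxf →
      PySem.List.pyGetD ((PySem.Dict.counter qs).values.foldl pvBump
        (List.replicate (maxf + 1).toNat 0)) v 0
        = ((PySem.Dict.counter qs).values.count v : Int) := by
    intro v h1 h2
    rw [pvBump_getD _ _
        (by
          intro f hf
          have hp := hvals_pos f hf
          have hl := hle f hf
          constructor
          · omega
          · simp only [List.length_replicate]; omega)
        v (by omega) (by simp only [List.length_replicate]; omega)]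
    rw [PySem.List.pyGetD_eq_getElem _ _ (by omega)
        (by simp only [List.length_replicate]; omega)]
    simp
  have hfs : (PySem.List.pyRange maxf 0 (-1)).Pairwise (fun a b => b < a) := by
    rw [PySem.List.pyRange_neg_one]
    exact List.Pairwise.map _ (fun a b hab => by omega) List.pairwise_lt_range
  have hnd : (PySem.List.pyRange maxf 0 (-1)).Nodup :=
    hfs.imp (fun h => by omega)
  have hperm : (PySem.Dict.counter qs).values.Perm
      ((PySem.List.pyRange maxf 0 (-1)).flatMap (fun f =>
        List.replicate (PySem.List.pyGetD ((PySem.Dict.counter qs).values.foldl pvBump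
          (List.replicate (maxf + 1).toNat 0)) f 0).toNat f)) := by
    rw [List.perm_iff_count]
    intro v
    rw [pv_count_flatMap_replicate _ _ hnd]
    by_cases hin : v ∈ PySem.List.pyRange maxf 0 (-1)
    · obtain ⟨h1, h2⟩ := PySem.List.mem_pyRange_neg_one.mp hin
      rw [if_pos hin, hbuck v h1 h2]
      simp
    · rw [if_neg hin]
      rw [List.count_eq_zero]
      intro hv
      exact hin (PySem.List.mem_pyRange_neg_one.mpr
        ⟨by have := hvals_pos v hv; omega, hle v hv⟩)
  have hsortB := pv_pairwise_flatMap_replicate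
    (fun f => (PySem.List.pyGetD ((PySem.Dict.counter qs).values.foldl pvBump
      (List.replicate (maxf + 1).toNat 0)) f 0).toNat)
    (PySem.List.pyRange maxf 0 (-1)) hfs
  have hpermA : ((PySem.List.sorted (PySem.Dict.counter qs).items
      (fun x => -x.2) false).map Prod.snd).Perm (PySem.Dict.counter qs).values :=
    List.Perm.map Prod.snd (PySem.List.sorted_perm _ _ _)
  have hsortA : ((PySem.List.sorted (PySem.Dict.counter qs).items
      (fun x => -x.2) false).map Prod.snd).Pairwise (fun a b => b ≤ a) :=
    List.Pairwise.map _ (fun a b (h : -a.2 ≤ -b.2) => by omega)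
      (PySem.List.sorted_pairwise _ _)
  -- the two descending frequency sequences coincide
  have heq : (PySem.List.sorted (PySem.Dict.counter qs).items
      (fun x => -x.2) false).map Prod.snd
      = (PySem.List.pyRange maxf 0 (-1)).flatMap (fun f =>
        List.replicate (PySem.List.pyGetD ((PySem.Dict.counter qs).values.foldl pvBump
          (List.replicate (maxf + 1).toNat 0)) f 0).toNat f) :=
    List.Perm.eq_of_pairwise (fun a b _ _ h1 h2 => le_antisymm h2 h1)
      hsortA hsortB (hpermA.trans hperm)
  simp only [halfQuestions, halfQuestions_alt]
  rw [if_neg hsize]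
  simp only [hmaxf]
  rw [pvGoA_eq, pvOuterB_eq, PySem.List.pyRepeat_singleton, heq]

-- ===== VERDICT (by name: the statement is the Claim_ definition above) =====
theorem halfQuestions_spec : Claim_equal_halfQuestions := by
  intro qs _
  show halfQuestions qs = halfQuestions_alt qs
  rcases qs with _ | ⟨q, qs'⟩
  · rfl
  · exact pv_main _ (by simp)
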